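-- pv_equiv track=rewrite | github.com/Recusive/Nightshift | nightshift.py | top_path
-- ===== SOURCE A (Python) =====
-- def top_path(files: list[str]) -> str:
--     top_level: dict[str, int] = {}
--     for entry in files:
--         if not entry:
--             continue
--         part = entry.split("/", 1)[0]
--         top_level[part] = top_level.get(part, 0) + 1
--     if not top_level:
--         return "(none)"
--     return sorted(top_level.items(), key=lambda item: (-item[1], item[0]))[0][0]
-- ===== SOURCE B (Python) =====
-- def top_path(files: list[str]) -> str:
--     parts = sorted(e.split("/", 1)[0] for e in files if e)
--     if not parts:
--         return "(none)"
--     n = len(parts)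
--     best_name = parts[0]
--     best_count = 0
--     i = 0
--     while i < n:
--         head = parts[i]
--         j = i + 1
--         while j < n and parts[j] == head:
--             j += 1
--         if j - i > best_count:
--             best_count = j - i
--             best_name = head
--         i = j
--     return best_name
-- ===== Notes on version B (the rewrite author's own statement) =====
-- stated objective: alternative
-- what changed: Replaces A's dict-of-counts plus full sort of (count,name) pairs by sorting the top-level components once and scanning consecutive runs, keeping the best run under strict comparison so ties resolve to the smallest name automatically.
import Mathlib
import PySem

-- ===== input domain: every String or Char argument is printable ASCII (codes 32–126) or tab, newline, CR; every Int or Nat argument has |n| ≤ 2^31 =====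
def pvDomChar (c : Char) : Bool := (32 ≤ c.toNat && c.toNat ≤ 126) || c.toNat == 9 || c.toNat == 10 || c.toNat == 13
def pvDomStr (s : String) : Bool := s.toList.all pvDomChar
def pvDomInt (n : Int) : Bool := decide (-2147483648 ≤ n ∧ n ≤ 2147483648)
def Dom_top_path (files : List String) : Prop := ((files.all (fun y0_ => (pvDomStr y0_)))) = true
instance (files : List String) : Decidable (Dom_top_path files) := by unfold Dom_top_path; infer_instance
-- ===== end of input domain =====

-- B replaces A's dict of counts + full sort of (-count, name) pairs by one sort of the
-- components and a single run-length scan with a strict comparison (objective: alternative).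

-- shared helper: entry.split("/", 1)[0]; split with a nonempty separator always returns a
-- nonempty list, so the two defaults are unreachable (exact)
def pvPart (s : String) : String := ((PySem.Str.splitMax? s "/" 1).getD []).headD ""

-- ===== PORT A =====
def top_path (files : List String) : String :=
  let top_level : PySem.Dict String Int :=
    files.foldl (fun d entry =>
      if entry = "" then d
      else d.modify (pvPart entry) 0 (· + 1)) PySem.Dict.empty
  if top_level.items = [] then "(none)"
  else
    -- sorted(top_level.items(), key=lambda item: (-item[1], item[0]))[0][0];
    -- the dict is nonempty here, so the headD default is unreachable
    ((PySem.List.sorted2 top_level.items (fun item => -item.2) (fun item => item.1) false).headD ("", 0)).1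

-- ===== PORT B =====
-- [e.split("/", 1)[0] for e in files if e]
def pvParts (files : List String) : List String :=
  (files.filter (fun e => ¬ (e = ""))).map pvPart

-- B's index pair (i, j) walks suffixes of parts; the port carries the suffix parts[i:]
-- directly. Inner while loop: advance j past the leading run equal to head, returning
-- (j - i - 1, parts[j:])
def pvTakeRun (head : String) : List String → Int × List String
  | [] => (0, [])
  | x :: rest => if x = head then
      let r := pvTakeRun head rest
      (r.1 + 1, r.2)
    else (0, x :: rest)

lemma pvTakeRun_len (head : String) (l : List String) : (pvTakeRun head l).2.length ≤ l.length := by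
  induction l with
  | nil => simp [pvTakeRun]
  | cons x rest ih =>
    by_cases h : x = head
    · simp [pvTakeRun, h]; omega
    · simp [pvTakeRun, h]

-- the outer while loop over the sorted parts (argument = the suffix parts[i:]);
-- state = (best_name, best_count); run = j - i = (pvTakeRun head tail).1 + 1
def pvScan : List String → String → Int → String × Int
  | [], best_name, best_count => (best_name, best_count)
  | h :: t, best_name, best_count =>
      if (pvTakeRun h t).1 + 1 > best_count then pvScan (pvTakeRun h t).2 h ((pvTakeRun h t).1 + 1)
      else pvScan (pvTakeRun h t).2 best_name best_count
termination_by parts => parts.length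
decreasing_by all_goals exact Nat.lt_succ_of_le (pvTakeRun_len _ _)

def top_path_alt (files : List String) : String :=
  match PySem.List.sorted (pvParts files) (fun x => x) false with
  | [] => "(none)"
  | h :: t => (pvScan (h :: t) h 0).1

-- ===== PRECONDITION & SPEC =====
def Spec_top_path (files : List String) (out : String) : Prop := out = top_path_alt files
instance (files : List String) (out : String) : Decidable (Spec_top_path files out) := by unfold Spec_top_path; infer_instance

-- ===== CLAIM (what is proved, stated in full; the proofs are below) =====
def Claim_equal_top_path : Prop := ∀ (files : List String), Dom_top_path files → Spec_top_path files (top_path files)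

-- ===== LEMMAS AND PROOFS =====

-- "r is a most frequent element of parts, smallest name among ties"
def pvIsBest (parts : List String) (r : String) : Prop :=
  r ∈ parts ∧ ∀ k ∈ parts, parts.count k < parts.count r ∨ (parts.count k = parts.count r ∧ r ≤ k)

lemma pvIsBest_unique {parts : List String} {a b : String}
    (ha : pvIsBest parts a) (hb : pvIsBest parts b) : a = b := by
  obtain ⟨haMem, haAll⟩ := ha
  obtain ⟨hbMem, hbAll⟩ := hb
  rcases haAll b hbMem with h | ⟨hc, hle⟩
  · rcases hbAll a haMem with h' | ⟨hc', _⟩ <;> omega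
  · rcases hbAll a haMem with h' | ⟨_, hle'⟩
    · omega
    · exact le_antisymm hle hle'

lemma pvIsBest_perm {l l' : List String} (h : l.Perm l') {r : String}
    (hr : pvIsBest l r) : pvIsBest l' r := by
  obtain ⟨hm, hall⟩ := hr
  refine ⟨h.mem_iff.mp hm, fun k hk => ?_⟩
  rw [← h.count_eq, ← h.count_eq]
  exact hall k (h.mem_iff.mpr hk)

-- A's loop over files equals the Counter loop over the collected parts
lemma foldA_eq (files : List String) (d : PySem.Dict String Int) :
    files.foldl (fun d entry => if entry = "" then d else d.modify (pvPart entry) 0 (· + 1)) d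
      = (pvParts files).foldl (fun d x => d.modify x 0 (· + 1)) d := by
  induction files generalizing d with
  | nil => simp [pvParts]
  | cons e fs ih =>
    by_cases h : e = "" <;> simp [pvParts, List.foldl, h, ih]

-- sorting by the two-part key (-count, name) is sorting by the lexicographic product key
lemma sorted2_eq_sorted_lex (xs : List (String × Int)) :
    PySem.List.sorted2 xs (fun it => -it.2) (fun it => it.1) false
      = PySem.List.sorted xs (fun it => toLex ((-it.2 : Int), it.1)) false := by
  unfold PySem.List.sorted2 PySem.List.sorted
  simp only [if_neg (by decide : ¬ (false = true))]
  congr 1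
  funext acc x
  congr 1
  funext p q
  rcases p with ⟨p1, p2⟩
  rcases q with ⟨q1, q2⟩
  rw [Bool.eq_iff_iff]
  simp only [Bool.or_eq_true, Bool.and_eq_true, Bool.not_eq_true', decide_eq_true_eq,
    decide_eq_false_iff_not, Prod.Lex.lt_iff, ofLex_toLex]
  constructor
  · rintro (h | ⟨h, h2⟩)
    · exact Or.inl h
    · by_cases hlt : (-p2 : Int) < -q2
      · exact Or.inl hlt
      · exact Or.inr ⟨le_antisymm (not_lt.mp h) (not_lt.mp hlt), h2⟩
  · rintro (h | ⟨h, h2⟩)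
    · exact Or.inl h
    · exact Or.inr ⟨by rw [h]; exact lt_irrefl _, h2⟩

lemma items_counter (parts : List String) :
    (PySem.Dict.counter parts).items = (PySem.Set.ofList parts).map (fun k => (k, (parts.count k : Int))) := by
  rw [PySem.Dict.items_eq_map_keys _ (PySem.Dict.nodup_keys_counter parts) 0,
    PySem.Dict.keys_counter]
  simp [PySem.Dict.getD_counter]

lemma top_path_best (files : List String) (hne : pvParts files ≠ []) :
    pvIsBest (pvParts files) (top_path files) := by
  unfold top_path
  rw [foldA_eq, ← PySem.Dict.counter_eq_foldl]
  set parts := pvParts files with hp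
  have hitems := items_counter parts
  obtain ⟨p0, hp0⟩ := List.exists_mem_of_ne_nil _ hne
  have hdne : PySem.Set.ofList parts ≠ [] := by
    intro hcon
    have := (PySem.Set.mem_ofList parts p0).mpr hp0
    rw [hcon] at this; exact absurd this (List.not_mem_nil)
  have hine : (PySem.Dict.counter parts).items ≠ [] := by
    rw [hitems]; simpa using hdne
  rw [if_neg hine, sorted2_eq_sorted_lex]
  rcases hsrt : PySem.List.sorted (PySem.Dict.counter parts).items
      (fun it => toLex ((-it.2 : Int), it.1)) false with _ | ⟨m, t⟩
  · exact absurd ((PySem.List.sorted_eq_nil_iff _ _ _).mp hsrt) hine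
  · have hmem : m ∈ (PySem.Dict.counter parts).items := by
      have := PySem.List.sorted_perm (PySem.Dict.counter parts).items
        (fun it => toLex ((-it.2 : Int), it.1)) false
      rw [hsrt] at this
      exact this.mem_iff.mp (List.mem_cons_self ..)
    have hle := PySem.List.key_head_sorted_le (PySem.Dict.counter parts).items
      (fun it => toLex ((-it.2 : Int), it.1)) hsrt
    rw [hitems] at hmem
    obtain ⟨k0, hk0, hm⟩ := List.mem_map.mp hmem
    simp only [List.headD_cons]
    constructor
    · rw [← hm]; exact (PySem.Set.mem_ofList ..).mp hk0
    · intro k hk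
      have hy : (k, (parts.count k : Int)) ∈ (PySem.Dict.counter parts).items := by
        rw [hitems]; exact List.mem_map.mpr ⟨k, (PySem.Set.mem_ofList ..).mpr hk, rfl⟩
      have := hle _ hy
      rw [← hm] at this ⊢
      dsimp only at this ⊢
      simp only [Prod.Lex.le_iff, ofLex_toLex] at this
      rcases this with h | ⟨h, h2⟩
      · left; omega
      · right; exact ⟨by omega, h2⟩

lemma top_path_none (files : List String) (h : pvParts files = []) :
    top_path files = "(none)" := by
  unfold top_path
  rw [foldA_eq, ← PySem.Dict.counter_eq_foldl, h]
  rfl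

-- the leading-run facts on a sorted list
lemma run_gt (h : String) (t : List String) (hs : (h :: t).Pairwise (fun a b : String => a ≤ b)) :
    ∀ x ∈ t.dropWhile (fun x => x == h), h < x := by
  induction t with
  | nil => simp
  | cons x t' ih =>
    rw [List.pairwise_cons, List.forall_mem_cons] at hs
    obtain ⟨⟨hhx, hht⟩, hp⟩ := hs
    rw [List.pairwise_cons] at hp
    by_cases hx : x = h
    · rw [List.dropWhile]
      simp only [hx, beq_self_eq_true]
      exact ih (List.pairwise_cons.mpr ⟨hht, hp.2⟩)
    · rw [List.dropWhile]
      simp only [beq_eq_false_iff_ne.mpr hx]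
      intro z hz
      rcases List.mem_cons.mp hz with rfl | hz'
      · exact lt_of_le_of_ne hhx (fun e => hx e.symm)
      · exact lt_of_lt_of_le (lt_of_le_of_ne hhx (fun e => hx e.symm)) (hp.1 z hz')

lemma run_counts (h : String) (t : List String) (hs : (h :: t).Pairwise (fun a b : String => a ≤ b)) :
    ((h :: t).count h = (t.takeWhile (fun x => x == h)).length + 1 ∧
      (t.dropWhile (fun x => x == h)).count h = 0) ∧
    (∀ k, k ≠ h → (h :: t).count k = (t.dropWhile (fun x => x == h)).count k) := by
  have hgt := run_gt h t hs
  have hw : ∀ x ∈ t.takeWhile (fun x => x == h), x = h := by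
    intro x hx
    simpa using List.mem_takeWhile_imp hx
  have hr0 : (t.dropWhile (fun x => x == h)).count h = 0 :=
    List.count_eq_zero.mpr (fun hmem => lt_irrefl _ (hgt h hmem))
  have hteq : h :: t = h :: (t.takeWhile (fun x => x == h) ++ t.dropWhile (fun x => x == h)) := by
    rw [List.takeWhile_append_dropWhile]
  have hwc : (t.takeWhile (fun x => x == h)).count h = (t.takeWhile (fun x => x == h)).length := by
    rw [List.count_eq_length]
    intro b hb
    rw [hw b hb]
  constructor
  · refine ⟨?_, hr0⟩
    rw [hteq, List.count_cons_self, List.count_append, hwc, hr0]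
  · intro k hk
    have hwk : (t.takeWhile (fun x => x == h)).count k = 0 :=
      List.count_eq_zero.mpr (fun hmem => hk (hw k hmem))
    rw [hteq, List.count_cons, List.count_append, hwk]
    simp [Ne.symm hk]

lemma pvTakeRun_eq (head : String) (l : List String) :
    pvTakeRun head l = (((l.takeWhile (fun x => x == head)).length : Int), l.dropWhile (fun x => x == head)) := by
  induction l with
  | nil => simp [pvTakeRun]
  | cons x rest ih =>
    by_cases h : x = head
    · subst h
      simp [pvTakeRun, ih]
    · simp [pvTakeRun, h]

-- the run scan's invariant on a sorted list: the final best_count dominates bc and every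
-- multiplicity, and best is either untouched or the smallest name realising best_count
lemma pvScan_spec (n : Nat) : ∀ (s : List String), s.length ≤ n →
    s.Pairwise (fun a b : String => a ≤ b) → ∀ (best : String) (bc : Int),
    bc ≤ (pvScan s best bc).2 ∧
    (∀ k ∈ s, (s.count k : Int) ≤ (pvScan s best bc).2) ∧
    (((pvScan s best bc).1 = best ∧ (pvScan s best bc).2 = bc) ∨
      ((pvScan s best bc).1 ∈ s ∧ ((s.count (pvScan s best bc).1 : Int)) = (pvScan s best bc).2 ∧
        bc < (pvScan s best bc).2 ∧
        ∀ k ∈ s, (s.count k : Int) = (pvScan s best bc).2 → (pvScan s best bc).1 ≤ k)) := by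
  induction n with
  | zero =>
    intro s hlen hs best bc
    rw [List.length_eq_zero_iff.mp (Nat.le_zero.mp hlen)]
    simp [pvScan]
  | succ n ih =>
    intro s hlen hs best bc
    match s with
    | [] => simp [pvScan]
    | h :: t =>
      have hcounts := run_counts h t hs
      set w := t.takeWhile (fun x => x == h) with hwdef
      set r := t.dropWhile (fun x => x == h) with hrdef
      have hrlen : r.length ≤ n := by
        have h1 : r.length ≤ t.length := by
          rw [hrdef]; exact List.length_dropWhile_le _ _
        simp only [List.length_cons] at hlen
        omega
      have hrs : r.Pairwise (fun a b : String => a ≤ b) :=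
        List.Pairwise.sublist (List.dropWhile_sublist _) hs.of_cons
      have hmemr : ∀ k ∈ r, k ∈ h :: t := by
        intro k hk
        exact List.mem_cons_of_mem h (List.Sublist.mem hk (List.dropWhile_sublist _))
      have hrun : pvTakeRun h t = ((w.length : Int), r) := pvTakeRun_eq h t
      have hs_count_h : (h :: t).count h = w.length + 1 := hcounts.1.1
      have hr_count_h : r.count h = 0 := hcounts.1.2
      have hs_count_ne : ∀ k, k ≠ h → (h :: t).count k = r.count k := hcounts.2
      rw [pvScan, hrun]
      dsimp only
      by_cases hcase : (w.length : Int) + 1 > bc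
      · rw [if_pos hcase]
        obtain ⟨ih1, ih2, ih3⟩ := ih r hrlen hrs h ((w.length : Int) + 1)
        refine ⟨by omega, ?_, ?_⟩
        · intro k hk
          rcases List.mem_cons.mp hk with rfl | hkt
          · rw [hs_count_h]; push_cast; omega
          · by_cases hkh : k = h
            · subst hkh; rw [hs_count_h]; push_cast; omega
            · rw [hs_count_ne k hkh]
              by_cases hkr : k ∈ r
              · exact ih2 k hkr
              · rw [List.count_eq_zero.mpr hkr]; omega
        · rcases ih3 with ⟨he1, he2⟩ | ⟨hm1, hm2, hm3, hm4⟩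
          · right
            rw [he1, he2, hs_count_h]
            refine ⟨List.mem_cons_self .., by push_cast; omega, hcase, ?_⟩
            intro k hk _
            rcases List.mem_cons.mp hk with rfl | hkt
            · exact le_refl _
            · exact List.rel_of_pairwise_cons hs hkt
          · right
            have hner : (pvScan r h ((w.length : Int) + 1)).1 ≠ h := by
              intro e
              rw [e, hr_count_h] at hm2
              push_cast at hm2
              omega
            refine ⟨hmemr _ hm1, ?_, by omega, ?_⟩
            · rw [hs_count_ne _ hner]; exact hm2
            · intro k hk hkc
              by_cases hkh : k = h
              · subst hkh
                rw [hs_count_h] at hkc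
                push_cast at hkc
                omega
              · rw [hs_count_ne k hkh] at hkc
                by_cases hkr : k ∈ r
                · exact hm4 k hkr hkc
                · rw [List.count_eq_zero.mpr hkr] at hkc
                  push_cast at hkc
                  omega
      · rw [if_neg hcase]
        obtain ⟨ih1, ih2, ih3⟩ := ih r hrlen hrs best bc
        refine ⟨ih1, ?_, ?_⟩
        · intro k hk
          by_cases hkh : k = h
          · subst hkh; rw [hs_count_h]; push_cast; omega
          · rw [hs_count_ne k hkh]
            by_cases hkr : k ∈ r
            · exact ih2 k hkr
            · rw [List.count_eq_zero.mpr hkr]; omega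
        · rcases ih3 with ⟨he1, he2⟩ | ⟨hm1, hm2, hm3, hm4⟩
          · left; exact ⟨he1, he2⟩
          · right
            have hner : (pvScan r best bc).1 ≠ h := by
              intro e
              rw [e, hr_count_h] at hm2
              push_cast at hm2
              omega
            refine ⟨hmemr _ hm1, ?_, hm3, ?_⟩
            · rw [hs_count_ne _ hner]; exact hm2
            · intro k hk hkc
              by_cases hkh : k = h
              · subst hkh
                rw [hs_count_h] at hkc
                push_cast at hkc
                omega
              · rw [hs_count_ne k hkh] at hkc
                by_cases hkr : k ∈ r
                · exact hm4 k hkr hkc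
                · rw [List.count_eq_zero.mpr hkr] at hkc
                  push_cast at hkc
                  omega

lemma top_path_alt_best (files : List String) (hne : pvParts files ≠ []) :
    pvIsBest (pvParts files) (top_path_alt files) := by
  unfold top_path_alt
  have hperm := PySem.List.sorted_perm (pvParts files) (fun x => x) false
  have hpw := PySem.List.sorted_pairwise (pvParts files) (fun x => x)
  rcases hsrt : PySem.List.sorted (pvParts files) (fun x => x) false with _ | ⟨h, t⟩
  · rw [hsrt] at hperm
    exact absurd hperm.symm.eq_nil hne
  · rw [hsrt] at hperm hpw
    obtain ⟨sp1, sp2, sp3⟩ := pvScan_spec (h :: t).length (h :: t) le_rfl hpw h 0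
    have hbest : pvIsBest (h :: t) (pvScan (h :: t) h 0).1 := by
      rcases sp3 with ⟨he1, he2⟩ | ⟨hm1, hm2, _, hm4⟩
      · exfalso
        have := sp2 h (List.mem_cons_self ..)
        rw [he2] at this
        have hpos : 0 < (h :: t).count h := List.count_pos_iff.mpr (List.mem_cons_self ..)
        omega
      · refine ⟨hm1, fun k hk => ?_⟩
        have hle := sp2 k hk
        by_cases heq : (h :: t).count k = (h :: t).count (pvScan (h :: t) h 0).1
        · exact Or.inr ⟨heq, hm4 k hk (by rw [heq]; exact hm2)⟩
        · left; omega
    exact pvIsBest_perm hperm hbest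

lemma top_path_alt_none (files : List String) (h : pvParts files = []) :
    top_path_alt files = "(none)" := by
  simp [top_path_alt, h, PySem.List.sorted]

-- ===== VERDICT (by name: the statement is the Claim_ definition above) =====
theorem top_path_spec : Claim_equal_top_path := by
  intro files _
  unfold Spec_top_path
  by_cases h : pvParts files = []
  · rw [top_path_none files h, top_path_alt_none files h]
  · exact pvIsBest_unique (top_path_best files h) (top_path_alt_best files h)
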